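-- pv_equiv track=rewrite | github.com/Naumenko-KM/Yandex_Algorithms | 5D - Город Че.py | find_allperms
-- ===== SOURCE A (Python) =====
-- def find_distances(monuments):
--     distances = [0] * len(monuments)
--     for i in range(1, len(distances)):
--         distances[i] = monuments[i] - monuments[i-1]
--     return distances
--
-- def find_prefix_sum(distances):
--     prefix_sum = [0] * (len(distances) + 1)
--     for i in range(1, len(prefix_sum)):
--         prefix_sum[i] = prefix_sum[i-1] + distances[i-1]
--     return prefix_sum
--
-- def rsq(prefixsum, x, y):
--     result = prefixsum[y] - prefixsum[x]
--     return result
--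
-- def find_allperms(n, r, monuments):
--     distances = find_distances(monuments)
--     prefixsum = find_prefix_sum(distances)
--     allperms = 0
--     k = 0
--     for i in range(1, n):
--         for j in range(k, n+1):
--             k = j
--             if rsq(prefixsum, i, j) > r:
--                 allperms += n + 1 - j
--                 break
--     return allperms
-- ===== SOURCE B (Python) =====
-- def _build(vals, lo, hi):
--     # max segment tree over vals[lo:hi] as nested tuples (max, left, right); leaf = (value, None, None)
--     if hi - lo == 1:
--         return (vals[lo], None, None)
--     mid = (lo + hi) // 2
--     left = _build(vals, lo, mid)
--     right = _build(vals, mid, hi)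
--     return (max(left[0], right[0]), left, right)
--
--
-- def _first_above(node, lo, hi, k, t):
--     # smallest index j in [k, hi) covered by this node with vals[j] > t, else None
--     if hi <= k or node[0] <= t:
--         return None
--     if hi - lo == 1:
--         return lo
--     mid = (lo + hi) // 2
--     res = _first_above(node[1], lo, mid, k, t)
--     if res is None:
--         res = _first_above(node[2], mid, hi, k, t)
--     return res
--
--
-- def find_allperms(n, r, monuments):
--     if n < 2:
--         return 0
--     # vals[j] = distance from the first monument to monument j (vals[0] = 0 is a sentinel origin)
--     vals = [0]
--     for j in range(1, n + 1):
--         vals.append(monuments[j - 1] - monuments[0])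
--     tree = _build(vals, 0, n + 1)
--     total = 0
--     k = 0
--     for i in range(1, n):
--         j = _first_above(tree, 0, n + 1, k, r + vals[i])
--         if j is None:
--             k = n
--         else:
--             total += n + 1 - j
--             k = j
--     return total
-- ===== Notes on version B (the rewrite author's own statement) =====
-- stated objective: alternative
-- what changed: B replaces A's persistent-pointer linear rescans with a max segment tree over the prefix-distance array: each outer step answers 'first index >= k whose value exceeds r + vals[i]' by an O(log n) tree descent instead of A's inner for-loop scan. Pre_ excludes n > len(monuments) (for n >= 2): there A indexes the prefix-sum array out of range and raises IndexError on most such inputs; on the few where an early break returns first (e.g. (2, -1, [0])) B raises IndexError while building its table, so those inputs are excluded too.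
-- outside the precondition, e.g. on find_allperms(2, -1, [0]): A returns 3, B raises IndexError
import Mathlib
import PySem

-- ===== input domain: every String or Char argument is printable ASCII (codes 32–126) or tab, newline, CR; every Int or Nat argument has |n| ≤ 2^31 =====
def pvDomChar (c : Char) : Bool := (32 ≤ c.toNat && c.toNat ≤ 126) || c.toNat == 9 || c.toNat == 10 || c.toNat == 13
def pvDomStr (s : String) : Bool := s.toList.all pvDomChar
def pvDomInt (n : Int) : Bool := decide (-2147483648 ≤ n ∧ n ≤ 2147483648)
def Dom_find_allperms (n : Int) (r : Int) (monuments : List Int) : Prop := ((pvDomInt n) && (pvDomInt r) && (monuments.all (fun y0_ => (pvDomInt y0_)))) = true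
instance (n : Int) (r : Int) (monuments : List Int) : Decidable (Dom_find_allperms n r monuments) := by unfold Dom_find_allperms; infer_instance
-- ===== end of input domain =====

-- ===== PORT A =====
-- B answers each outer step with a max-segment-tree descent instead of A's persistent inner scan:
-- a genuinely different data structure, proved to return the same count. Return values only; neither
-- program mutates its arguments.

def find_distances (monuments : List Int) : List Int :=
  (PySem.List.pyRange 1 (monuments.length : Int) 1).foldl
    (fun distances i =>
      PySem.List.pySetD distances i
        (PySem.List.pyGetD monuments i 0 - PySem.List.pyGetD monuments (i - 1) 0))
    (List.replicate monuments.length 0)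

def find_prefix_sum (distances : List Int) : List Int :=
  (PySem.List.pyRange 1 ((distances.length : Int) + 1) 1).foldl
    (fun prefix_sum i =>
      PySem.List.pySetD prefix_sum i
        (PySem.List.pyGetD prefix_sum (i - 1) 0 + PySem.List.pyGetD distances (i - 1) 0))
    (List.replicate (distances.length + 1) 0)

def rsq (prefixsum : List Int) (x y : Int) : Int :=
  PySem.List.pyGetD prefixsum y 0 - PySem.List.pyGetD prefixsum x 0

-- A's inner 'for j in range(k, n+1): k = j; if rsq(...) > r: allperms += n+1-j; break'
def innerLoopA (prefixsum : List Int) (r n i : Int) : List Int → Int × Int → Int × Int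
  | [], st => st
  | j :: js, st =>
    if rsq prefixsum i j > r then (st.1 + (n + 1 - j), j)
    else innerLoopA prefixsum r n i js (st.1, j)

def find_allperms (n : Int) (r : Int) (monuments : List Int) : Int :=
  let distances := find_distances monuments
  let prefixsum := find_prefix_sum distances
  ((PySem.List.pyRange 1 n 1).foldl
    (fun st i => innerLoopA prefixsum r n i (PySem.List.pyRange st.2 (n + 1) 1) st)
    (0, 0)).1

-- ===== PORT B =====
-- B's max segment tree, nested tuples in Python: (max, left, right), leaf = (value, None, None)
inductive Seg where
  | leaf : Int → Seg
  | node : Int → Seg → Seg → Seg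
deriving DecidableEq, Repr

def Seg.mx : Seg → Int
  | .leaf v => v
  | .node m _ _ => m

-- B's _build(vals, lo, hi); structural on a fuel bound ≥ hi - lo (the fuel-0 leaf and the '≤ 1'
-- (Python: '== 1') are totality guards never reached from B's call)
def segBuild (vals : List Int) : Nat → Int → Int → Seg
  | 0, lo, _ => .leaf (PySem.List.pyGetD vals lo 0)
  | fuel + 1, lo, hi =>
    if hi - lo ≤ 1 then .leaf (PySem.List.pyGetD vals lo 0)
    else
      let mid := PySem.Int.floordiv (lo + hi) 2
      let l := segBuild vals fuel lo mid
      let r := segBuild vals fuel mid hi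
      .node (max l.mx r.mx) l r

-- B's _first_above(node, lo, hi, k, t) (Python detects a leaf with 'hi - lo == 1'; trees built by
-- segBuild have leaves exactly there, so matching on the constructor is the same test)
def segFirstAbove : Seg → Int → Int → Int → Int → Option Int
  | .leaf v, lo, hi, k, t =>
    if hi ≤ k ∨ v ≤ t then none else some lo
  | .node m l r, lo, hi, k, t =>
    if hi ≤ k ∨ m ≤ t then none
    else
      let mid := PySem.Int.floordiv (lo + hi) 2
      match segFirstAbove l lo mid k t with
      | some j => some j
      | none => segFirstAbove r mid hi k t

def find_allperms_alt (n : Int) (r : Int) (monuments : List Int) : Int :=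
  if n < 2 then 0
  else
    let vals := (PySem.List.pyRange 1 (n + 1) 1).foldl
      (fun vals j =>
        vals ++ [PySem.List.pyGetD monuments (j - 1) 0 - PySem.List.pyGetD monuments 0 0])
      [0]
    let tree := segBuild vals (n + 1).toNat 0 (n + 1)
    ((PySem.List.pyRange 1 n 1).foldl
      (fun st i =>
        match segFirstAbove tree 0 (n + 1) st.2 (r + PySem.List.pyGetD vals i 0) with
        | none => (st.1, n)
        | some j => (st.1 + (n + 1 - j), j)) ((0 : Int), (0 : Int))).1

-- ===== PRECONDITION & SPEC =====
-- Pre_ excludes n > len(monuments) with n >= 2: there A indexes its prefix-sum array out of range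
-- and raises IndexError on most such inputs (on the few where an early break returns first, B's
-- table build raises IndexError instead), so those inputs are excluded.
def Pre_find_allperms (n : Int) (r : Int) (monuments : List Int) : Prop :=
  1 < n → n ≤ (monuments.length : Int)
instance (n : Int) (r : Int) (monuments : List Int) : Decidable (Pre_find_allperms n r monuments) := by
  unfold Pre_find_allperms; infer_instance

def pvWitness_find_allperms : Int × Int × List Int := (3, 1, [0, 2, 5])

def Spec_find_allperms (n : Int) (r : Int) (monuments : List Int) (out : Int) : Prop := out = find_allperms_alt n r monuments
instance (n : Int) (r : Int) (monuments : List Int) (out : Int) : Decidable (Spec_find_allperms n r monuments out) := by unfold Spec_find_allperms; infer_instance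

-- ===== CLAIM (what is proved, stated in full; the proofs are below) =====
def Claim_equal_find_allperms : Prop := ∀ (n : Int) (r : Int) (monuments : List Int), Dom_find_allperms n r monuments → Pre_find_allperms n r monuments → Spec_find_allperms n r monuments (find_allperms n r monuments)

-- ===== LEMMAS AND PROOFS =====

-- the value A's prefix-sum array holds at index t (0 ≤ t ≤ len monuments)
def psVal (m : List Int) (t : Nat) : Int := if t = 0 then 0 else m.getD (t - 1) 0 - m.getD 0 0

lemma distfold_getD (m : List Int) :
    ∀ (k : Nat) (a : Int) (d : List Int), d.length = m.length → 1 ≤ a →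
      ((m.length : Int) - a).toNat = k →
      (((PySem.List.pyRange a (m.length : Int) 1).foldl
          (fun distances i =>
            PySem.List.pySetD distances i
              (PySem.List.pyGetD m i 0 - PySem.List.pyGetD m (i - 1) 0)) d).length = m.length ∧
       ∀ t : Nat, t < m.length →
        ((PySem.List.pyRange a (m.length : Int) 1).foldl
          (fun distances i =>
            PySem.List.pySetD distances i
              (PySem.List.pyGetD m i 0 - PySem.List.pyGetD m (i - 1) 0)) d).getD t 0 =
          if a ≤ (t : Int) then m.getD t 0 - m.getD (t - 1) 0 else d.getD t 0) := by
  intro k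
  induction k with
  | zero =>
    intro a d hd ha hk
    rw [PySem.List.pyRange_one_eq_nil (by omega)]
    simp only [List.foldl_nil]
    refine ⟨hd, fun t ht => ?_⟩
    rw [if_neg (by omega)]
  | succ k ih =>
    intro a d hd ha hk
    have halt : a < (m.length : Int) := by omega
    have h0a : (0 : Int) ≤ a := by omega
    rw [PySem.List.pyRange_one_cons halt]
    simp only [List.foldl_cons]
    obtain ⟨hlen', hget⟩ := ih (a + 1)
      (PySem.List.pySetD d a (PySem.List.pyGetD m a 0 - PySem.List.pyGetD m (a - 1) 0))
      (by rw [PySem.List.length_pySetD]; exact hd) (by omega) (by omega)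
    refine ⟨hlen', fun t ht => ?_⟩
    rw [hget t ht]
    by_cases h1 : a + 1 ≤ (t : Int)
    · rw [if_pos h1, if_pos (by omega)]
    · by_cases h2 : a ≤ (t : Int)
      · have hta : a.toNat = t := by omega
        rw [if_neg h1, if_pos h2,
          PySem.List.pySetD_of_nonneg d _ h0a,
          PySem.List.pyGetD_of_nonneg m 0 h0a,
          PySem.List.pyGetD_of_nonneg m 0 (by omega : (0:Int) ≤ a - 1), hta]
        have h1t : (a - 1).toNat = t - 1 := by omega
        have htd : t < d.length := by omega
        rw [h1t]
        simp [List.getD, htd]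
      · rw [if_neg h1, if_neg h2, PySem.List.pySetD_of_nonneg d _ h0a]
        have hne : a.toNat ≠ t := by omega
        simp [List.getD, List.getElem?_set_ne hne]

lemma find_distances_length (m : List Int) : (find_distances m).length = m.length := by
  exact (distfold_getD m ((m.length : Int) - 1).toNat 1 (List.replicate m.length 0)
    (by simp) (by omega) rfl).1

lemma find_distances_getD (m : List Int) (t : Nat) (ht : t < m.length) :
    (find_distances m).getD t 0 = if 1 ≤ (t : Int) then m.getD t 0 - m.getD (t - 1) 0 else 0 := by
  have h := (distfold_getD m ((m.length : Int) - 1).toNat 1 (List.replicate m.length 0)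
    (by simp) (by omega) rfl).2 t ht
  unfold find_distances
  rw [h]
  split <;> simp

lemma sum_take_succ_getD (l : List Int) (t : Nat) (ht : t < l.length) :
    (l.take (t + 1)).sum = (l.take t).sum + l.getD t 0 := by
  rw [List.sum_take_succ l t ht]
  simp [List.getElem?_eq_getElem ht]

lemma prefold_getD (dl : List Int) :
    ∀ (k : Nat) (a : Int) (p : List Int), p.length = dl.length + 1 → 1 ≤ a →
      (((dl.length : Int) + 1) - a).toNat = k →
      (∀ s : Nat, (s : Int) < a → p.getD s 0 = (dl.take s).sum) →
      ∀ t : Nat, t ≤ dl.length →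
        ((PySem.List.pyRange a ((dl.length : Int) + 1) 1).foldl
          (fun prefix_sum i =>
            PySem.List.pySetD prefix_sum i
              (PySem.List.pyGetD prefix_sum (i - 1) 0 + PySem.List.pyGetD dl (i - 1) 0)) p).getD t 0 =
          (dl.take t).sum := by
  intro k
  induction k with
  | zero =>
    intro a p hp ha hk hinv t ht
    rw [PySem.List.pyRange_one_eq_nil (by omega)]
    exact hinv t (by omega)
  | succ k ih =>
    intro a p hp ha hk hinv t ht
    have halt : a < (dl.length : Int) + 1 := by omega
    have h0a : (0 : Int) ≤ a := by omega
    have h0a1 : (0 : Int) ≤ a - 1 := by omega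
    rw [PySem.List.pyRange_one_cons halt]
    simp only [List.foldl_cons]
    refine ih (a + 1) _ (by rw [PySem.List.length_pySetD]; exact hp) (by omega) (by omega)
      (fun s hs => ?_) t ht
    rw [PySem.List.pySetD_of_nonneg p _ h0a]
    by_cases hsa : (s : Int) = a
    · have hsn : a.toNat = s := by omega
      have hsd : s < p.length := by omega
      rw [hsn]
      have hval : (List.set p s (PySem.List.pyGetD p (a - 1) 0 + PySem.List.pyGetD dl (a - 1) 0)).getD s 0
          = PySem.List.pyGetD p (a - 1) 0 + PySem.List.pyGetD dl (a - 1) 0 := by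
        simp [List.getD, hsd]
      rw [hval, PySem.List.pyGetD_of_nonneg p 0 h0a1, PySem.List.pyGetD_of_nonneg dl 0 h0a1]
      have h1 : (a - 1).toNat = s - 1 := by omega
      rw [h1, hinv (s - 1) (by omega)]
      have hs1 : s - 1 < dl.length := by omega
      have := sum_take_succ_getD dl (s - 1) hs1
      rw [← this]
      have : s - 1 + 1 = s := by omega
      rw [this]
    · have hne : a.toNat ≠ s := by omega
      rw [List.getD, List.getElem?_set_ne hne]
      exact hinv s (by omega)

lemma take_sum_dist (m : List Int) : ∀ (t : Nat), t ≤ m.length →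
    ((find_distances m).take t).sum = psVal m t := by
  intro t
  induction t with
  | zero => intro _; simp [psVal]
  | succ t ih =>
    intro ht
    have htl : t < (find_distances m).length := by rw [find_distances_length]; omega
    rw [sum_take_succ_getD _ t htl, ih (by omega), find_distances_getD m t (by omega)]
    rcases Nat.eq_zero_or_pos t with h0 | hpos
    · subst h0; simp [psVal]
    · rw [if_pos (by exact_mod_cast hpos)]
      simp only [psVal, if_neg (by omega : ¬ t = 0), if_neg (by omega : ¬ t + 1 = 0)]
      have : t + 1 - 1 = t := by omega
      rw [this]
      ring

lemma ps_getD (m : List Int) (t : Nat) (ht : t ≤ m.length) :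
    (find_prefix_sum (find_distances m)).getD t 0 = psVal m t := by
  unfold find_prefix_sum
  rw [prefold_getD (find_distances m) (find_distances m).length 1
    (List.replicate ((find_distances m).length + 1) 0) (by simp) (by omega) (by omega)
    (fun s hs => by
      have : s = 0 := by omega
      subst this; simp) t (by rw [find_distances_length]; omega)]
  exact take_sum_dist m t ht

-- B's vals list, in closed form
lemma vals_eq (monuments : List Int) (n : Int) :
    (PySem.List.pyRange 1 (n + 1) 1).foldl
      (fun vals j =>
        vals ++ [PySem.List.pyGetD monuments (j - 1) 0 - PySem.List.pyGetD monuments 0 0])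
      [0] =
    0 :: (PySem.List.pyRange 1 (n + 1) 1).map
      (fun j => PySem.List.pyGetD monuments (j - 1) 0 - PySem.List.pyGetD monuments 0 0) := by
  exact PySem.List.foldl_append_singleton_eq_map _ _ _

lemma vals_getD (monuments : List Int) (n j : Int) (h0 : 0 ≤ j) (hj : j ≤ n) (hn : 0 ≤ n) :
    PySem.List.pyGetD
      ((PySem.List.pyRange 1 (n + 1) 1).foldl
        (fun vals j =>
          vals ++ [PySem.List.pyGetD monuments (j - 1) 0 - PySem.List.pyGetD monuments 0 0])
        [0]) j 0 =
    (if j = 0 then 0 else PySem.List.pyGetD monuments (j - 1) 0 - PySem.List.pyGetD monuments 0 0) := by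
  rw [vals_eq, PySem.List.pyGetD_of_nonneg _ 0 h0]
  by_cases hj0 : j = 0
  · subst hj0; simp
  · rw [if_neg hj0]
    have h1 : j.toNat = (j.toNat - 1) + 1 := by omega
    rw [h1]
    simp only [List.getD_cons_succ]
    have h2 : j.toNat - 1 < ((n + 1) - 1).toNat := by omega
    have := PySem.List.pyGetD_map_pyRange_one
      (fun j => PySem.List.pyGetD monuments (j - 1) 0 - PySem.List.pyGetD monuments 0 0)
      1 (n + 1) (j.toNat - 1) 0 h2
    rw [PySem.List.pyGetD_of_nonneg _ 0 (by omega : (0:Int) ≤ ((j.toNat - 1 : Nat) : Int))] at this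
    simp only [Int.toNat_natCast] at this
    rw [this]
    have h3 : (1 : Int) + ((j.toNat - 1 : Nat) : Int) = j := by omega
    rw [h3]

-- max-segment-tree facts (vals t : fixed list / threshold throughout)
lemma segBuild_mx_ge (vals : List Int) :
    ∀ (f : Nat) (lo hi : Int), (hi - lo).toNat ≤ f → ∀ j, lo ≤ j → j < hi →
      PySem.List.pyGetD vals j 0 ≤ (segBuild vals f lo hi).mx := by
  intro f
  induction f with
  | zero => intro lo hi hf j hj1 hj2; omega
  | succ f ih =>
    intro lo hi hf j hj1 hj2
    rw [segBuild]
    split_ifs with h1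
    · have hjl : j = lo := by omega
      subst hjl
      simp [Seg.mx]
    · have hmid : PySem.Int.floordiv (lo + hi) 2 = (lo + hi) / 2 :=
        PySem.Int.floordiv_eq_ediv_of_pos (by norm_num)
      dsimp only [Seg.mx]
      rw [hmid]
      by_cases hjm : j < (lo + hi) / 2
      · exact le_trans (ih lo _ (by omega) j hj1 hjm) (le_max_left _ _)
      · exact le_trans (ih _ hi (by omega) j (by omega) hj2) (le_max_right _ _)

lemma segFirstAbove_eq_find? (vals : List Int) (k t : Int) :
    ∀ (f : Nat) (lo hi : Int), (hi - lo).toNat ≤ f → lo < hi →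
      segFirstAbove (segBuild vals f lo hi) lo hi k t =
        (PySem.List.pyRange (max lo k) hi 1).find? (fun j => decide (t < PySem.List.pyGetD vals j 0)) := by
  intro f
  induction f with
  | zero => intro lo hi hf hlo; omega
  | succ f ih =>
    intro lo hi hf hlo
    rw [segBuild]
    split_ifs with h1
    · have hhi : hi = lo + 1 := by omega
      subst hhi
      by_cases hk : lo + 1 ≤ k
      · rw [PySem.List.pyRange_one_eq_nil (by omega)]
        simp [segFirstAbove, hk]
      · have hmax : max lo k = lo := by omega
        rw [hmax, PySem.List.pyRange_one_singleton]
        by_cases hv : PySem.List.pyGetD vals lo 0 ≤ t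
        · rw [List.find?_cons_of_neg (by simp; omega), List.find?_nil]
          simp [segFirstAbove, hv]
        · rw [List.find?_cons_of_pos (by simp; omega)]
          simp only [segFirstAbove]
          rw [if_neg (not_or.mpr ⟨by omega, hv⟩)]
    · have hmid : PySem.Int.floordiv (lo + hi) 2 = (lo + hi) / 2 :=
        PySem.Int.floordiv_eq_ediv_of_pos (by norm_num)
      dsimp only
      rw [segFirstAbove, hmid]
      have hb1 : lo < (lo + hi) / 2 := by omega
      have hb2 : (lo + hi) / 2 < hi := by omega
      set mid := (lo + hi) / 2 with hm
      by_cases hk : hi ≤ k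
      · rw [if_pos (Or.inl hk), PySem.List.pyRange_one_eq_nil (by omega)]
        rfl
      · by_cases hmx : max (segBuild vals f lo mid).mx (segBuild vals f mid hi).mx ≤ t
        · rw [if_pos (Or.inr hmx)]
          symm
          rw [List.find?_eq_none]
          intro j hj
          rw [PySem.List.mem_pyRange_one] at hj
          have h := segBuild_mx_ge vals (f + 1) lo hi (by omega) j (by omega) hj.2
          rw [segBuild] at h
          rw [if_neg h1] at h
          dsimp only [Seg.mx] at h
          rw [hmid] at h
          simp only [decide_eq_true_eq, not_lt]
          have : PySem.List.pyGetD vals j 0 ≤ max (segBuild vals f lo mid).mx (segBuild vals f mid hi).mx := h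
          omega
        · rw [if_neg (not_or.mpr ⟨hk, hmx⟩)]
          dsimp only
          have ihl := ih lo mid (by omega) hb1
          have ihr := ih mid hi (by omega) hb2
          by_cases hkm : k ≤ mid
          · have hsplit : PySem.List.pyRange (max lo k) hi 1 =
                PySem.List.pyRange (max lo k) mid 1 ++ PySem.List.pyRange mid hi 1 :=
              PySem.List.pyRange_one_append _ _ _ (by omega) (by omega)
            rw [hsplit, List.find?_append, ihl, ihr]
            have hmm : max mid k = mid := by omega
            rw [hmm]
            cases hfl : (PySem.List.pyRange (max lo k) mid 1).find?
                (fun j => decide (t < PySem.List.pyGetD vals j 0)) <;>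
              simp [Option.or]
          · have h1' : max lo k = k := by omega
            have h2' : max mid k = k := by omega
            rw [ihl, ihr, h1', h2', PySem.List.pyRange_one_eq_nil (by omega : mid ≤ k),
              List.find?_nil]

-- A's inner loop, characterised by the first hit of its scan
lemma innerA_eq_find? (ps : List Int) (r n i : Int) :
    ∀ (f : Nat) (k acc k0 : Int), 0 ≤ k → k ≤ n → (n - k).toNat = f →
      innerLoopA ps r n i (PySem.List.pyRange k (n + 1) 1) (acc, k0) =
        match (PySem.List.pyRange k (n + 1) 1).find? (fun j => decide (r < rsq ps i j)) with
        | some j => (acc + (n + 1 - j), j)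
        | none => (acc, n) := by
  intro f
  induction f with
  | zero =>
    intro k acc k0 h0 hkn hf
    have : k = n := by omega
    subst this
    rw [PySem.List.pyRange_one_singleton]
    by_cases hc : rsq ps i k > r
    · rw [List.find?_cons_of_pos (by simpa using hc)]
      simp only [innerLoopA, if_pos hc]
    · rw [List.find?_cons_of_neg (by simpa using hc), List.find?_nil]
      simp only [innerLoopA, if_neg hc]
  | succ f ihf =>
    intro k acc k0 h0 hkn hf
    rw [PySem.List.pyRange_one_cons (by omega : k < n + 1)]
    by_cases hc : rsq ps i k > r
    · rw [List.find?_cons_of_pos (by simpa using hc)]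
      simp only [innerLoopA, if_pos hc]
    · rw [List.find?_cons_of_neg (by simpa using hc)]
      simp only [innerLoopA, if_neg hc]
      exact ihf (k + 1) acc k (by omega) (by omega) (by omega)

lemma find?_congr_mem {α : Type} (l : List α) (p q : α → Bool)
    (h : ∀ x ∈ l, p x = q x) : l.find? p = l.find? q := by
  induction l with
  | nil => rfl
  | cons x xs ih =>
    simp only [List.find?]
    rw [h x (by simp)]
    cases hq : q x
    · exact ih (fun y hy => h y (by simp [hy]))
    · rfl

lemma psv_eq (m : List Int) (n x : Int) (hlen : n ≤ (m.length : Int)) (h0 : 0 ≤ x)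
    (hx : x ≤ n) (hn : 0 ≤ n) :
    PySem.List.pyGetD (find_prefix_sum (find_distances m)) x 0 =
    PySem.List.pyGetD ((PySem.List.pyRange 1 (n + 1) 1).foldl
        (fun vals j => vals ++ [PySem.List.pyGetD m (j - 1) 0 - PySem.List.pyGetD m 0 0]) [0]) x 0 := by
  rw [PySem.List.pyGetD_of_nonneg _ 0 h0, ps_getD m x.toNat (by omega), vals_getD m n x h0 hx hn]
  unfold psVal
  by_cases hx0 : x = 0
  · subst hx0; simp
  · rw [if_neg (by omega : ¬ x.toNat = 0), if_neg hx0,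
      PySem.List.pyGetD_of_nonneg m 0 (by omega : (0:Int) ≤ x - 1),
      PySem.List.pyGetD_of_nonneg m 0 (by omega : (0:Int) ≤ (0:Int))]
    have h1 : (x - 1).toNat = x.toNat - 1 := by omega
    rw [h1]
    norm_num

lemma outer_eq (m : List Int) (n r : Int) (hn : 2 ≤ n) (hlen : n ≤ (m.length : Int)) :
    ∀ (l : List Int), (∀ i ∈ l, 1 ≤ i ∧ i < n) → ∀ (acc k : Int), 0 ≤ k → k ≤ n →
      l.foldl
        (fun st i => innerLoopA (find_prefix_sum (find_distances m)) r n i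
          (PySem.List.pyRange st.2 (n + 1) 1) st) (acc, k) =
      l.foldl
        (fun st i =>
          match segFirstAbove
              (segBuild ((PySem.List.pyRange 1 (n + 1) 1).foldl
                (fun vals j => vals ++ [PySem.List.pyGetD m (j - 1) 0 - PySem.List.pyGetD m 0 0]) [0])
                (n + 1).toNat 0 (n + 1))
              0 (n + 1) st.2
              (r + PySem.List.pyGetD ((PySem.List.pyRange 1 (n + 1) 1).foldl
                (fun vals j => vals ++ [PySem.List.pyGetD m (j - 1) 0 - PySem.List.pyGetD m 0 0]) [0]) i 0) with
          | none => (st.1, n)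
          | some j => (st.1 + (n + 1 - j), j)) (acc, k) := by
  intro l
  induction l with
  | nil => intros; rfl
  | cons i l ihl =>
    intro hmem acc k hk0 hkn
    obtain ⟨hi1, hi2⟩ := hmem i (by simp)
    simp only [List.foldl_cons]
    have hseg := segFirstAbove_eq_find?
      ((PySem.List.pyRange 1 (n + 1) 1).foldl
        (fun vals j => vals ++ [PySem.List.pyGetD m (j - 1) 0 - PySem.List.pyGetD m 0 0]) [0])
      k (r + PySem.List.pyGetD ((PySem.List.pyRange 1 (n + 1) 1).foldl
        (fun vals j => vals ++ [PySem.List.pyGetD m (j - 1) 0 - PySem.List.pyGetD m 0 0]) [0]) i 0)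
      (n + 1).toNat 0 (n + 1) (by omega) (by omega)
    have hmax : max (0:Int) k = k := by omega
    rw [hmax] at hseg
    have hcong : (PySem.List.pyRange k (n + 1) 1).find?
          (fun j => decide (r + PySem.List.pyGetD ((PySem.List.pyRange 1 (n + 1) 1).foldl
              (fun vals j => vals ++ [PySem.List.pyGetD m (j - 1) 0 - PySem.List.pyGetD m 0 0]) [0]) i 0 <
            PySem.List.pyGetD ((PySem.List.pyRange 1 (n + 1) 1).foldl
              (fun vals j => vals ++ [PySem.List.pyGetD m (j - 1) 0 - PySem.List.pyGetD m 0 0]) [0]) j 0)) =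
        (PySem.List.pyRange k (n + 1) 1).find?
          (fun j => decide (r < rsq (find_prefix_sum (find_distances m)) i j)) := by
      apply find?_congr_mem
      intro x hx
      rw [PySem.List.mem_pyRange_one] at hx
      have e1 := psv_eq m n x hlen (by omega) (by omega) (by omega)
      have e2 := psv_eq m n i hlen (by omega) (by omega) (by omega)
      unfold rsq
      rw [← e1, ← e2]
      rcases lt_or_ge r (PySem.List.pyGetD (find_prefix_sum (find_distances m)) x 0 -
          PySem.List.pyGetD (find_prefix_sum (find_distances m)) i 0) with h | h
      · rw [decide_eq_true (by omega), decide_eq_true (by omega)]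
      · rw [decide_eq_false (by omega), decide_eq_false (by omega)]
    rw [hseg, hcong]
    have hstep := innerA_eq_find? (find_prefix_sum (find_distances m)) r n i
      (n - k).toNat k acc k hk0 hkn rfl
    rw [hstep]
    cases hf : (PySem.List.pyRange k (n + 1) 1).find?
        (fun j => decide (r < rsq (find_prefix_sum (find_distances m)) i j)) with
    | none =>
      exact ihl (fun x hx => hmem x (by simp [hx])) acc n (by omega) le_rfl
    | some j =>
      have hj := List.mem_of_find?_eq_some hf
      rw [PySem.List.mem_pyRange_one] at hj
      exact ihl (fun x hx => hmem x (by simp [hx])) (acc + (n + 1 - j)) j (by omega) (by omega)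

-- ===== VERDICT (by name: the statement is the Claim_ definition above) =====
theorem find_allperms_spec : Claim_equal_find_allperms := by
  intro n r m _hdom hpre
  unfold Spec_find_allperms find_allperms find_allperms_alt
  by_cases hn : n < 2
  · rw [if_pos hn, PySem.List.pyRange_one_eq_nil (by omega : n ≤ 1)]
    rfl
  · rw [if_neg hn]
    have hlen : n ≤ (m.length : Int) := hpre (by omega)
    have h := outer_eq m n r (by omega) hlen (PySem.List.pyRange 1 n 1)
      (fun i hi => by rw [PySem.List.mem_pyRange_one] at hi; exact ⟨hi.1, hi.2⟩)
      0 0 le_rfl (by omega)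
    dsimp only
    rw [h]
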